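-- pv_equiv track=rewrite | github.com/lebahoang/cp | leetcode/year_2023/417.py | dfs1
-- ===== SOURCE A (Python) =====
-- def dfs1(i,j,n,m,h,v):
--     if i == 0 or j == 0:
--         return True
--     c = [[-1, 0], [1, 0], [0, -1], [0, 1]]
--     f = False
--     for x in c:
--         a = i+x[0]
--         b = j+x[1]
--         if a >= 0 and a < n and b >= 0 and b < m and h[i][j] >= h[a][b] and (a,b) not in v:
--             v[(a,b)] = 1
--             f = dfs1(a,b,n,m,h,v)
--             if f:
--                 break
--     return f
-- ===== SOURCE B (Python) =====
-- def dfs1(i, j, n, m, h, v):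
--     c = [(-1, 0), (1, 0), (0, -1), (0, 1)]
--     stack = [(i, j, list(c))]
--     while stack:
--         p, q, dirs = stack[-1]
--         if p == 0 or q == 0:
--             return True
--         if not dirs:
--             stack.pop()
--             continue
--         stack[-1] = (p, q, dirs[1:])
--         dx, dy = dirs[0]
--         a = p + dx
--         b = q + dy
--         if 0 <= a < n and 0 <= b < m and h[p][q] >= h[a][b] and (a, b) not in v:
--             v[(a, b)] = 1
--             stack.append((a, b, list(c)))
--     return False
-- ===== Notes on version B (the rewrite author's own statement) =====
-- stated objective: alternative
-- what changed: The recursive DFS (Python call stack, for-loop over directions with break) is replaced by an iterative DFS driven by an explicit stack of frames (cell, remaining-directions list): the top frame is examined each iteration, a qualifying neighbour is marked in v and pushed, success returns immediately, an exhausted frame is popped; same visited-set mutations, traversal order and return value.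
-- outside the precondition, e.g. on dfs1(1, 1, 5, 5, [[1, 2], [3, 4]], {}): A returns True, B returns True
import Mathlib
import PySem

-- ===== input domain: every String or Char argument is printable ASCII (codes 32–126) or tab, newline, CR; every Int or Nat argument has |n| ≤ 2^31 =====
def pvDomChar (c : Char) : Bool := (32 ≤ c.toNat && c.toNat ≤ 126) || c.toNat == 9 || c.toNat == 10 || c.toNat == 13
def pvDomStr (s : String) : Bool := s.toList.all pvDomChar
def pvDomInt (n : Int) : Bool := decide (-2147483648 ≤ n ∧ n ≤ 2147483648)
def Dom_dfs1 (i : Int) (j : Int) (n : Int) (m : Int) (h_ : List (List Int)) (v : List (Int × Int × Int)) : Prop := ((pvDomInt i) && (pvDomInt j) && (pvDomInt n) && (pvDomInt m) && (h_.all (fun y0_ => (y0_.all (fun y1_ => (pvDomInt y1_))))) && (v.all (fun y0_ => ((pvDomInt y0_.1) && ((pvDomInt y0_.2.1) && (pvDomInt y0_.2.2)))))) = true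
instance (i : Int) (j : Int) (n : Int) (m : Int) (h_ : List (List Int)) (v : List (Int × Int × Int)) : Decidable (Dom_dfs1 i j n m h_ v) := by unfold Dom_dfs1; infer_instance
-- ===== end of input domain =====

-- B replaces A's recursive DFS by an iterative DFS over an explicit stack of (cell, remaining-directions)
-- frames (same guards, same marks written into v, same order); equivalence of the RETURN value is proved
-- on Pre_ (border start, or well-formed grid with the start in bounds); both Pythons also perform the
-- identical mutations of the shared dict v.


-- ===== PORT A =====
-- shared primitives of the two Pythons: the dict-membership test '(a,b) in v', the grid read h[x][y]
-- (exact inside Pre_, where all reads are in range), and the direction list c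
def pvHasKey (v : List (Int × Int × Int)) (a b : Int) : Bool :=
  v.any (fun t => t.1 == a && t.2.1 == b)

def pvHval (h_ : List (List Int)) (x y : Int) : Int :=
  (PySem.List.pyGet? ((PySem.List.pyGet? h_ x).getD []) y).getD 0

def pvDirs : List (Int × Int) := [(-1, 0), (1, 0), (0, -1), (0, 1)]

-- A, fuel-structural (fuel is only a totality guard: one unit per Python recursive call; the top-level
-- fuel n.toNat*m.toNat+1 always exceeds the recursion depth, see pvFree_le / pvMain below)
mutual
def pvGoA (n m : Int) (h_ : List (List Int)) (fu : Nat) (i j : Int)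
    (v : List (Int × Int × Int)) : Bool × List (Int × Int × Int) :=
  match fu with
  | 0 => (false, v)
  | fu' + 1 =>
    if i = 0 ∨ j = 0 then (true, v)
    else pvLoopA n m h_ fu' i j v pvDirs
termination_by (fu, 0)

def pvLoopA (n m : Int) (h_ : List (List Int)) (fu : Nat) (i j : Int)
    (v : List (Int × Int × Int)) (ds : List (Int × Int)) : Bool × List (Int × Int × Int) :=
  match ds with
  | [] => (false, v)
  | d :: ds' =>
    let a := i + d.1
    let b := j + d.2
    if 0 ≤ a ∧ a < n ∧ 0 ≤ b ∧ b < m ∧ pvHval h_ i j ≥ pvHval h_ a b ∧ pvHasKey v a b = false then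
      let r := pvGoA n m h_ fu a b (v ++ [(a, b, 1)])
      if r.1 then (true, r.2) else pvLoopA n m h_ fu i j r.2 ds'
    else pvLoopA n m h_ fu i j v ds'
termination_by (fu, ds.length + 1)
end

def dfs1 (i : Int) (j : Int) (n : Int) (m : Int) (h_ : List (List Int)) (v : List (Int × Int × Int)) : Bool :=
  (pvGoA n m h_ (n.toNat * m.toNat + 1) i j v).1

-- ===== PORT B =====
-- termination facts for the stack machine (cited by pvStep's decreasing_by)
theorem pvHasKey_append (v : List (Int × Int × Int)) (t : Int × Int × Int) (a b : Int) :
    pvHasKey (v ++ [t]) a b = (pvHasKey v a b || (t.1 == a && t.2.1 == b)) := by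
  simp [pvHasKey]

-- cells of the n×m grid not yet keys of v
def pvFree (n m : Int) (v : List (Int × Int × Int)) : Nat :=
  ((Finset.range n.toNat ×ˢ Finset.range m.toNat).filter
    (fun ab => pvHasKey v (ab.1 : Int) (ab.2 : Int) = false)).card

theorem pvFree_insert_lt (n m : Int) (v : List (Int × Int × Int)) (a b : Int)
    (h1 : 0 ≤ a) (h2 : a < n) (h3 : 0 ≤ b) (h4 : b < m) (h5 : pvHasKey v a b = false) :
    pvFree n m (v ++ [(a, b, 1)]) < pvFree n m v := by
  apply Finset.card_lt_card
  constructor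
  · intro ab hab
    simp only [Finset.mem_filter] at hab ⊢
    refine ⟨hab.1, ?_⟩
    have h2 := hab.2
    rw [pvHasKey_append] at h2
    simp only [Bool.or_eq_false_iff] at h2
    exact h2.1
  · intro hsub
    have hmem : ((a.toNat, b.toNat) : Nat × Nat) ∈
        (Finset.range n.toNat ×ˢ Finset.range m.toNat).filter
          (fun ab => pvHasKey v (ab.1 : Int) (ab.2 : Int) = false) := by
      simp only [Finset.mem_filter, Finset.mem_product, Finset.mem_range]
      refine ⟨⟨by omega, by omega⟩, ?_⟩
      simpa [Int.toNat_of_nonneg h1, Int.toNat_of_nonneg h3] using h5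
    have := hsub hmem
    simp only [Finset.mem_filter] at this
    have hk : pvHasKey (v ++ [(a, b, 1)]) (a.toNat : Int) (b.toNat : Int) = true := by
      rw [pvHasKey_append]
      simp [Int.toNat_of_nonneg h1, Int.toNat_of_nonneg h3]
    rw [this.2] at hk
    exact absurd hk (by decide)

def pvWeight (st : List (Int × Int × List (Int × Int))) : Nat :=
  (st.map (fun f => f.2.2.length + 1)).sum

-- B: the while loop over the explicit stack; each frame is (cell-row, cell-col, untried directions)
def pvStep (n m : Int) (h_ : List (List Int)) (stack : List (Int × Int × List (Int × Int)))
    (v : List (Int × Int × Int)) : Bool :=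
  match stack with
  | [] => false
  | (p, q, dirs) :: rest =>
    if p = 0 ∨ q = 0 then true
    else
      match dirs with
      | [] => pvStep n m h_ rest v
      | d :: ds =>
        let a := p + d.1
        let b := q + d.2
        if hg : 0 ≤ a ∧ a < n ∧ 0 ≤ b ∧ b < m ∧ pvHval h_ p q ≥ pvHval h_ a b ∧ pvHasKey v a b = false then
          pvStep n m h_ ((a, b, pvDirs) :: (p, q, ds) :: rest) (v ++ [(a, b, 1)])
        else pvStep n m h_ ((p, q, ds) :: rest) v
termination_by 6 * pvFree n m v + pvWeight stack
decreasing_by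
  · simp only [pvWeight, List.map_cons, List.sum_cons]; omega
  · have hlt := pvFree_insert_lt n m v (p + d.1) (q + d.2) hg.1 hg.2.1 hg.2.2.1 hg.2.2.2.1 hg.2.2.2.2.2
    simp only [pvWeight, pvDirs, List.map_cons, List.sum_cons, List.length_cons, List.length_nil]
    omega
  · simp only [pvWeight, List.map_cons, List.sum_cons, List.length_cons]; omega

def dfs1_alt (i : Int) (j : Int) (n : Int) (m : Int) (h_ : List (List Int)) (v : List (Int × Int × Int)) : Bool :=
  pvStep n m h_ [(i, j, pvDirs)] v

-- ===== PRECONDITION & SPEC =====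
-- Pre_ admits: the immediate border returns; starts with no neighbour inside the n×m rectangle (A
-- performs no grid read at all); and otherwise a readable start cell h[i][j] (Python's negative-index
-- wrap included) together with a fully readable n×m rectangle (n ≤ len(h), m ≤ each of the first n row
-- lengths) — every grid read A can ever perform is then in range, so A never raises. A also happens to
-- return (rather than raise) on some grids whose n×m rectangle is NOT fully readable, whenever the
-- traversal accidentally avoids the unreadable cells; whether that raises depends on the whole
-- traversal, so those inputs are excluded as outside the function's natural domain.
def Pre_dfs1 (i : Int) (j : Int) (n : Int) (m : Int) (h_ : List (List Int)) (v : List (Int × Int × Int)) : Prop :=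
  (i = 0 ∨ j = 0) ∨
    (¬ ((0 ≤ i - 1 ∧ i - 1 < n ∧ 0 ≤ j ∧ j < m) ∨ (0 ≤ i + 1 ∧ i + 1 < n ∧ 0 ≤ j ∧ j < m) ∨
        (0 ≤ i ∧ i < n ∧ 0 ≤ j - 1 ∧ j - 1 < m) ∨ (0 ≤ i ∧ i < n ∧ 0 ≤ j + 1 ∧ j + 1 < m))) ∨
    (PySem.Raise.InRange h_.length i ∧
     PySem.Raise.InRange ((PySem.List.pyGet? h_ i).getD []).length j ∧
     n ≤ (h_.length : Int) ∧ ∀ r ∈ h_.take n.toNat, m ≤ (r.length : Int))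
instance (i : Int) (j : Int) (n : Int) (m : Int) (h_ : List (List Int)) (v : List (Int × Int × Int)) : Decidable (Pre_dfs1 i j n m h_ v) := by unfold Pre_dfs1; infer_instance

def pvWitness_dfs1 : Int × Int × Int × Int × List (List Int) × (List (Int × Int × Int)) :=
  (1, 1, 2, 2, [[1, 2], [3, 4]], [])

def Spec_dfs1 (i : Int) (j : Int) (n : Int) (m : Int) (h_ : List (List Int)) (v : List (Int × Int × Int)) (out : Bool) : Prop := out = dfs1_alt i j n m h_ v
instance (i : Int) (j : Int) (n : Int) (m : Int) (h_ : List (List Int)) (v : List (Int × Int × Int)) (out : Bool) : Decidable (Spec_dfs1 i j n m h_ v out) := by unfold Spec_dfs1; infer_instance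

-- ===== CLAIM (what is proved, stated in full; the proofs are below) =====
def Claim_equal_dfs1 : Prop := ∀ (i : Int) (j : Int) (n : Int) (m : Int) (h_ : List (List Int)) (v : List (Int × Int × Int)), Dom_dfs1 i j n m h_ v → Pre_dfs1 i j n m h_ v → Spec_dfs1 i j n m h_ v (dfs1 i j n m h_ v)

-- ===== LEMMAS AND PROOFS =====
theorem pvGrow (n m : Int) (h_ : List (List Int)) : ∀ fu : Nat,
    (∀ i j v x y, pvHasKey v x y = true → pvHasKey (pvGoA n m h_ fu i j v).2 x y = true) ∧
    (∀ ds i j v x y, pvHasKey v x y = true → pvHasKey (pvLoopA n m h_ fu i j v ds).2 x y = true) := by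
  intro fu
  induction fu using Nat.strong_induction_on with
  | _ fu IH =>
    have hgo : ∀ i j v x y, pvHasKey v x y = true → pvHasKey (pvGoA n m h_ fu i j v).2 x y = true := by
      intro i j v x y hxy
      match fu with
      | 0 => simpa [pvGoA] using hxy
      | fu' + 1 =>
        rw [pvGoA]
        by_cases hb : i = 0 ∨ j = 0
        · simpa [hb] using hxy
        · simp only [hb, if_false]
          exact (IH fu' (by omega)).2 pvDirs i j v x y hxy
    refine ⟨hgo, ?_⟩
    intro ds
    induction ds with
    | nil => intro i j v x y hxy; simpa [pvLoopA] using hxy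
    | cons d ds' IH2 =>
      intro i j v x y hxy
      have h1 : pvHasKey (v ++ [(i + d.1, j + d.2, 1)]) x y = true := by
        rw [pvHasKey_append, hxy]; rfl
      have h2 := hgo (i + d.1) (j + d.2) (v ++ [(i + d.1, j + d.2, 1)]) x y h1
      rw [pvLoopA]
      dsimp only
      split_ifs with hc hr
      · exact h2
      · exact IH2 i j _ x y h2
      · exact IH2 i j v x y hxy

theorem pvFree_mono (n m : Int) (v w : List (Int × Int × Int))
    (h : ∀ x y, pvHasKey v x y = true → pvHasKey w x y = true) :
    pvFree n m w ≤ pvFree n m v := by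
  apply Finset.card_le_card
  intro ab hab
  simp only [Finset.mem_filter] at hab ⊢
  refine ⟨hab.1, ?_⟩
  by_contra hc
  have hv : pvHasKey v (ab.1 : Int) (ab.2 : Int) = true := by
    cases hx : pvHasKey v (ab.1 : Int) (ab.2 : Int) with
    | false => exact absurd hx hc
    | true => rfl
  rw [h _ _ hv] at hab
  simpa using hab.2

theorem pvFree_le (n m : Int) (v : List (Int × Int × Int)) :
    pvFree n m v ≤ n.toNat * m.toNat := by
  calc pvFree n m v ≤ (Finset.range n.toNat ×ˢ Finset.range m.toNat).card :=
        Finset.card_filter_le _ _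
    _ = n.toNat * m.toNat := by simp

theorem pvFree_loop_le (n m : Int) (h_ : List (List Int)) (fu : Nat) (ds : List (Int × Int))
    (i j : Int) (v : List (Int × Int × Int)) :
    pvFree n m (pvLoopA n m h_ fu i j v ds).2 ≤ pvFree n m v :=
  pvFree_mono n m v _ (fun x y hxy => (pvGrow n m h_ fu).2 ds i j v x y hxy)

theorem pvMain (n m : Int) (h_ : List (List Int)) : ∀ (fu : Nat) (ds : List (Int × Int)) (i j : Int)
    (v : List (Int × Int × Int)) (rest : List (Int × Int × List (Int × Int))),
    pvFree n m v ≤ fu →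
    pvStep n m h_ ((i, j, ds) :: rest) v =
      (if i = 0 ∨ j = 0 then true
       else if (pvLoopA n m h_ fu i j v ds).1 then true
       else pvStep n m h_ rest (pvLoopA n m h_ fu i j v ds).2) := by
  intro fu
  induction fu using Nat.strong_induction_on with
  | _ fu IH =>
    intro ds
    induction ds with
    | nil =>
      intro i j v rest hf
      rw [pvStep, pvLoopA]
      by_cases hb : i = 0 ∨ j = 0 <;> simp [hb]
    | cons d ds' IH2 =>
      intro i j v rest hf
      by_cases hb : i = 0 ∨ j = 0
      · rw [pvStep]; simp [hb]
      · by_cases hc : 0 ≤ i + d.1 ∧ i + d.1 < n ∧ 0 ≤ j + d.2 ∧ j + d.2 < m ∧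
            pvHval h_ i j ≥ pvHval h_ (i + d.1) (j + d.2) ∧ pvHasKey v (i + d.1) (j + d.2) = false
        · have hlt := pvFree_insert_lt n m v (i + d.1) (j + d.2)
            hc.1 hc.2.1 hc.2.2.1 hc.2.2.2.1 hc.2.2.2.2.2
          obtain ⟨fc, rfl⟩ : ∃ fc, fu = fc + 1 := ⟨fu - 1, by omega⟩
          rw [pvStep]
          dsimp only
          rw [if_neg hb, dif_pos hc]
          rw [IH fc (by omega) pvDirs (i + d.1) (j + d.2) _ ((i, j, ds') :: rest) (by omega)]
          rw [pvLoopA]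
          dsimp only
          rw [if_neg hb, if_pos hc, pvGoA]
          by_cases hab : i + d.1 = 0 ∨ j + d.2 = 0
          · simp [hab]
          · rw [if_neg hab, if_neg hab]
            by_cases hr : (pvLoopA n m h_ fc (i + d.1) (j + d.2)
                (v ++ [(i + d.1, j + d.2, 1)]) pvDirs).1 = true
            · simp [hr]
            · simp only [Bool.not_eq_true] at hr
              simp only [hr, if_false, Bool.false_eq_true]
              have hfr : pvFree n m (pvLoopA n m h_ fc (i + d.1) (j + d.2)
                  (v ++ [(i + d.1, j + d.2, 1)]) pvDirs).2 ≤ fc + 1 :=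
                le_trans (pvFree_loop_le n m h_ fc pvDirs (i + d.1) (j + d.2) _) (by omega)
              rw [IH2 i j _ rest hfr]
              rw [if_neg hb]
        · rw [pvStep]
          dsimp only
          rw [if_neg hb, dif_neg hc]
          rw [IH2 i j v rest hf]
          rw [if_neg hb, pvLoopA]
          dsimp only
          rw [if_neg hb, if_neg hc]

-- ===== VERDICT (by name: the statement is the Claim_ definition above) =====
theorem dfs1_spec : Claim_equal_dfs1 := by
  intro i j n m h_ v _ _
  unfold Spec_dfs1 dfs1 dfs1_alt
  rw [pvMain n m h_ (n.toNat * m.toNat) pvDirs i j v [] (pvFree_le n m v)]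
  rw [pvGoA]
  by_cases hb : i = 0 ∨ j = 0
  · simp [hb]
  · simp only [hb, if_false]
    cases hr : (pvLoopA n m h_ (n.toNat * m.toNat) i j v pvDirs).1
    · simp [pvStep]
    · simp
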